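-- pv_equiv track=rewrite | github.com/arifiorino/Shapes-A-Puzzle-Game | Python Generator/SplitBackground.py | getBorderSquares
-- ===== SOURCE A (Python) =====
-- def getBorderSquares(squares):
--     width,height=len(squares[0]),len(squares)
--     borderSquares=[]
--     for x in range(width):
--         for y in range(height):
--             if squares[y][x]==1:
--                 if not squares[y][x] in borderSquares:
--                     borderSquares.append([x,y])
--                 break
--
--     for y in range(height): #go right to left
--         for x in range(width-1,-1,-1):
--             if squares[y][x]==1:
--                 if not squares[y][x] in borderSquares:
--                     borderSquares.append([x,y])
--                 break
--
--     for x in range(width):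
--         for y in range(height-1,-1,-1):
--             if squares[y][x]==1:
--                 if not squares[y][x] in borderSquares:
--                     borderSquares.append([x,y])
--                 break
--
--     for y in range(height): #go right to left
--         for x in range(width):
--             if squares[y][x]==1:
--                 if not squares[y][x] in borderSquares:
--                     borderSquares.append([x,y])
--                 break
--     return borderSquares
-- ===== SOURCE B (Python) =====
-- def getBorderSquares(squares):
--     width, height = len(squares[0]), len(squares)
--     top = {}; bot = {}; left = {}; right = {}
--     for y in range(height):
--         for x in range(width):
--             if squares[y][x] == 1:
--                 if x not in top:
--                     top[x] = y
--                 bot[x] = y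
--                 if y not in left:
--                     left[y] = x
--                 right[y] = x
--     return ([[x, top[x]] for x in range(width) if x in top]
--           + [[right[y], y] for y in range(height) if y in right]
--           + [[x, bot[x]] for x in range(width) if x in bot]
--           + [[left[y], y] for y in range(height) if y in left])
-- ===== Notes on version B (the rewrite author's own statement) =====
-- stated objective: simpler
-- what changed: A runs four separate break-at-first directional scans (top/right/bottom/left) over the grid; B makes one pass over all cells tabulating per-column first/last hit row and per-row first/last hit column in four dicts, then assembles the same four groups by comprehensions (A's 'in borderSquares' dedup test compares an int with pairs and never fires, so both always append).
import Mathlib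
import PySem

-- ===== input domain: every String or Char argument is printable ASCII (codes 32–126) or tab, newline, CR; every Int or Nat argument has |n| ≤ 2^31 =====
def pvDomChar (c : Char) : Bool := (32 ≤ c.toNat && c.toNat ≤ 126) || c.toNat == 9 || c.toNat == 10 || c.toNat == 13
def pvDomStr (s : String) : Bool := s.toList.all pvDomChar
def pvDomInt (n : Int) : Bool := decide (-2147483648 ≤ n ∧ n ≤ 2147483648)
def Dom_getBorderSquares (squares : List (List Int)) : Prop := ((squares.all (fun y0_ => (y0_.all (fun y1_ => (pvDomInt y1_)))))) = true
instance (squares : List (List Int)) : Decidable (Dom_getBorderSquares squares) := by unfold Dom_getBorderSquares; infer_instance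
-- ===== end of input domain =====

-- B replaces A's four directional break-at-first scans by one pass that tabulates, per column, the
-- first/last hit row and, per row, the first/last hit column, then assembles the four groups
-- (objective: simpler single traversal of the grid).  Note: A's dedup test 'squares[y][x] in
-- borderSquares' compares the int 1 with coordinate pairs, so it never fires and every break appends.

-- shared indexing helper: squares[y][x] (both Pythons index the same way; Pre_ keeps indices in range)
def pvCell (squares : List (List Int)) (y x : Int) : Int :=
  PySem.List.pyGetD (PySem.List.pyGetD squares y []) x 0

-- ===== PORT A =====
-- Python's 'squares[y][x] in borderSquares': int '==' list is always False, membership is any(...)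
def pvIntInLists (v : Int) (bs : List (List Int)) : Bool := bs.any (fun _ => false)

-- inner 'for y in ys: if squares[y][x]==1: (guarded append); break'
def pvScanCol (squares : List (List Int)) (x : Int) (bs : List (List Int)) : List Int → List (List Int)
  | [] => bs
  | y :: rest =>
      if pvCell squares y x = 1 then
        (if pvIntInLists (pvCell squares y x) bs then bs else bs ++ [[x, y]])
      else pvScanCol squares x bs rest

-- inner 'for x in xs: if squares[y][x]==1: (guarded append); break'
def pvScanRow (squares : List (List Int)) (y : Int) (bs : List (List Int)) : List Int → List (List Int)
  | [] => bs
  | x :: rest =>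
      if pvCell squares y x = 1 then
        (if pvIntInLists (pvCell squares y x) bs then bs else bs ++ [[x, y]])
      else pvScanRow squares y bs rest

def getBorderSquares (squares : List (List Int)) : List (List Int) :=
  let width : Int := ((PySem.List.pyGetD squares 0 []).length : Int)
  let height : Int := (squares.length : Int)
  let bs1 := (PySem.List.pyRange 0 width 1).foldl
      (fun bs x => pvScanCol squares x bs (PySem.List.pyRange 0 height 1)) []
  let bs2 := (PySem.List.pyRange 0 height 1).foldl
      (fun bs y => pvScanRow squares y bs (PySem.List.pyRange (width - 1) (-1) (-1))) bs1
  let bs3 := (PySem.List.pyRange 0 width 1).foldl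
      (fun bs x => pvScanCol squares x bs (PySem.List.pyRange (height - 1) (-1) (-1))) bs2
  (PySem.List.pyRange 0 height 1).foldl
      (fun bs y => pvScanRow squares y bs (PySem.List.pyRange 0 width 1)) bs3

-- ===== PORT B =====
-- one cell of B's single pass: update top/bot (per column) and left/right (per row) tables
def pvStep (squares : List (List Int)) (y : Int)
    (st : PySem.Dict Int Int × PySem.Dict Int Int × PySem.Dict Int Int × PySem.Dict Int Int)
    (x : Int) :
    PySem.Dict Int Int × PySem.Dict Int Int × PySem.Dict Int Int × PySem.Dict Int Int :=
  if pvCell squares y x = 1 then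
    ((if st.1.contains x then st.1 else st.1.insert x y),
     st.2.1.insert x y,
     (if st.2.2.1.contains y then st.2.2.1 else st.2.2.1.insert y x),
     st.2.2.2.insert y x)
  else st

def getBorderSquares_alt (squares : List (List Int)) : List (List Int) :=
  let width : Int := ((PySem.List.pyGetD squares 0 []).length : Int)
  let height : Int := (squares.length : Int)
  let st := (PySem.List.pyRange 0 height 1).foldl
      (fun st y => (PySem.List.pyRange 0 width 1).foldl (fun st x => pvStep squares y st x) st)
      (PySem.Dict.empty, PySem.Dict.empty, PySem.Dict.empty, PySem.Dict.empty)
  ((PySem.List.pyRange 0 width 1).filterMap (fun x => (st.1.get? x).map (fun v => [x, v])))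
    ++ ((PySem.List.pyRange 0 height 1).filterMap (fun y => (st.2.2.2.get? y).map (fun v => [v, y])))
    ++ ((PySem.List.pyRange 0 width 1).filterMap (fun x => (st.2.1.get? x).map (fun v => [x, v])))
    ++ ((PySem.List.pyRange 0 height 1).filterMap (fun y => (st.2.2.1.get? y).map (fun v => [v, y])))

-- ===== PRECONDITION & SPEC =====
-- Pre_ excludes exactly the inputs where Python A raises IndexError: the empty grid (squares[0])
-- and grids with a row shorter than row 0 (the right-to-left scan starts at index width-1).
def Pre_getBorderSquares (squares : List (List Int)) : Prop :=
  squares ≠ [] ∧ ∀ row ∈ squares, (PySem.List.pyGetD squares 0 []).length ≤ row.length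
instance (squares : List (List Int)) : Decidable (Pre_getBorderSquares squares) := by
  unfold Pre_getBorderSquares; infer_instance

def pvWitness_getBorderSquares : List (List Int) := [[1, 0], [0, 1]]

def Spec_getBorderSquares (squares : List (List Int)) (out : List (List Int)) : Prop := out = getBorderSquares_alt squares
instance (squares : List (List Int)) (out : List (List Int)) : Decidable (Spec_getBorderSquares squares out) := by unfold Spec_getBorderSquares; infer_instance

-- ===== CLAIM (what is proved, stated in full; the proofs are below) =====
def Claim_equal_getBorderSquares : Prop := ∀ (squares : List (List Int)), Dom_getBorderSquares squares → Pre_getBorderSquares squares → Spec_getBorderSquares squares (getBorderSquares squares)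

-- ===== LEMMAS AND PROOFS =====

theorem pvIntInLists_false (v : Int) (bs : List (List Int)) : pvIntInLists v bs = false := by
  simp [pvIntInLists]

theorem pvScanCol_eq (squares : List (List Int)) (x : Int) (bs : List (List Int)) (ys : List Int) :
    pvScanCol squares x bs ys =
      bs ++ ((ys.find? (fun y => pvCell squares y x == 1)).map (fun y => [x, y])).toList := by
  induction ys with
  | nil => simp [pvScanCol]
  | cons y rest ih =>
      by_cases h : pvCell squares y x = 1
      · simp [pvScanCol, h, List.find?_cons, pvIntInLists_false]
      · simp [pvScanCol, h, List.find?_cons, ih]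

theorem pvScanRow_eq (squares : List (List Int)) (y : Int) (bs : List (List Int)) (xs : List Int) :
    pvScanRow squares y bs xs =
      bs ++ ((xs.find? (fun x => pvCell squares y x == 1)).map (fun x => [x, y])).toList := by
  induction xs with
  | nil => simp [pvScanRow]
  | cons x rest ih =>
      by_cases h : pvCell squares y x = 1
      · simp [pvScanRow, h, List.find?_cons, pvIntInLists_false]
      · simp [pvScanRow, h, List.find?_cons, ih]

-- characterizations of the four tables built by B's single pass
theorem pv_get?_of_contains {d : PySem.Dict Int Int} {k : Int} (h : d.contains k = true) :
    ∃ v, d.get? k = some v := by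
  have := PySem.Dict.contains_eq_isSome_get? (d := d) (k := k)
  rw [h] at this; exact Option.isSome_iff_exists.mp this.symm

theorem pv_get?_of_not_contains {d : PySem.Dict Int Int} {k : Int} (h : d.contains k = false) :
    d.get? k = none := by
  have := PySem.Dict.contains_eq_isSome_get? (d := d) (k := k)
  rw [h] at this
  cases hg : d.get? k <;> simp [hg] at this ⊢

theorem pv_top_inner (squares : List (List Int)) (y : Int) (xs : List Int)
    (t b l r : PySem.Dict Int Int) (x0 : Int) :
    ((xs.foldl (fun st x => pvStep squares y st x) (t, b, l, r)).1).get? x0 =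
      (t.get? x0).or (if x0 ∈ xs ∧ pvCell squares y x0 = 1 then some y else none) := by
  induction xs generalizing t b l r with
  | nil => simp
  | cons x rest ih =>
      rw [List.foldl_cons]
      by_cases h : pvCell squares y x = 1
      · rw [show pvStep squares y (t, b, l, r) x =
            ((if t.contains x then t else t.insert x y), b.insert x y,
             (if l.contains y then l else l.insert y x), r.insert y x) from by simp [pvStep, h]]
        rw [ih]
        by_cases hx : x0 = x
        · subst hx
          by_cases hc : t.contains x0
          · obtain ⟨v, hv⟩ := pv_get?_of_contains hc
            simp [hc, hv]
          · have hn : t.get? x0 = none := pv_get?_of_not_contains (by simpa using hc)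
            simp [hc, hn, PySem.Dict.get?_insert_self, h]
        · rw [show (if t.contains x then t else t.insert x y).get? x0 = t.get? x0 from by
              split <;> simp [PySem.Dict.get?_insert_of_ne _ _ hx]]
          simp [List.mem_cons, hx]
      · rw [show pvStep squares y (t, b, l, r) x = (t, b, l, r) from by simp [pvStep, h]]
        rw [ih]
        by_cases hx : x0 = x
        · subst hx; simp [List.mem_cons, h]
        · simp [List.mem_cons, hx]

theorem pv_bot_inner (squares : List (List Int)) (y : Int) (xs : List Int)
    (t b l r : PySem.Dict Int Int) (x0 : Int) :
    ((xs.foldl (fun st x => pvStep squares y st x) (t, b, l, r)).2.1).get? x0 =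
      if x0 ∈ xs ∧ pvCell squares y x0 = 1 then some y else b.get? x0 := by
  induction xs generalizing t b l r with
  | nil => simp
  | cons x rest ih =>
      rw [List.foldl_cons]
      by_cases h : pvCell squares y x = 1
      · rw [show pvStep squares y (t, b, l, r) x =
            ((if t.contains x then t else t.insert x y), b.insert x y,
             (if l.contains y then l else l.insert y x), r.insert y x) from by simp [pvStep, h]]
        rw [ih]
        by_cases hx : x0 = x
        · subst hx; simp [List.mem_cons, h, PySem.Dict.get?_insert_self]
        · simp [List.mem_cons, hx, PySem.Dict.get?_insert_of_ne _ _ hx]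
      · rw [show pvStep squares y (t, b, l, r) x = (t, b, l, r) from by simp [pvStep, h]]
        rw [ih]
        by_cases hx : x0 = x
        · subst hx; simp [List.mem_cons, h]
        · simp [List.mem_cons, hx]

theorem pv_left_inner (squares : List (List Int)) (y : Int) (xs : List Int)
    (t b l r : PySem.Dict Int Int) (y0 : Int) :
    ((xs.foldl (fun st x => pvStep squares y st x) (t, b, l, r)).2.2.1).get? y0 =
      (l.get? y0).or (if y0 = y then xs.find? (fun x => pvCell squares y x == 1) else none) := by
  induction xs generalizing t b l r with
  | nil => simp
  | cons x rest ih =>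
      rw [List.foldl_cons]
      by_cases h : pvCell squares y x = 1
      · rw [show pvStep squares y (t, b, l, r) x =
            ((if t.contains x then t else t.insert x y), b.insert x y,
             (if l.contains y then l else l.insert y x), r.insert y x) from by simp [pvStep, h]]
        rw [ih]
        by_cases hy : y0 = y
        · subst hy
          by_cases hc : l.contains y0
          · obtain ⟨v, hv⟩ := pv_get?_of_contains hc
            simp [hc, hv, h]
          · have hn : l.get? y0 = none := pv_get?_of_not_contains (by simpa using hc)
            simp [hc, hn, PySem.Dict.get?_insert_self, h]
        · rw [show (if l.contains y then l else l.insert y x).get? y0 = l.get? y0 from by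
              split <;> simp [PySem.Dict.get?_insert_of_ne _ _ hy]]
          simp [hy]
      · rw [show pvStep squares y (t, b, l, r) x = (t, b, l, r) from by simp [pvStep, h]]
        rw [ih]
        by_cases hy : y0 = y
        · subst hy; simp [List.find?_cons, h]
        · simp [hy]

theorem pv_right_inner (squares : List (List Int)) (y : Int) (xs : List Int)
    (t b l r : PySem.Dict Int Int) (y0 : Int) :
    ((xs.foldl (fun st x => pvStep squares y st x) (t, b, l, r)).2.2.2).get? y0 =
      (if y0 = y then xs.reverse.find? (fun x => pvCell squares y x == 1) else none).or
        (r.get? y0) := by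
  induction xs generalizing t b l r with
  | nil => simp
  | cons x rest ih =>
      rw [List.foldl_cons]
      by_cases h : pvCell squares y x = 1
      · rw [show pvStep squares y (t, b, l, r) x =
            ((if t.contains x then t else t.insert x y), b.insert x y,
             (if l.contains y then l else l.insert y x), r.insert y x) from by simp [pvStep, h]]
        rw [ih]
        by_cases hy : y0 = y
        · subst hy
          simp only [if_pos rfl, List.reverse_cons, List.find?_append,
            PySem.Dict.get?_insert_self, List.find?_cons, h]
          cases hf : rest.reverse.find? (fun x => pvCell squares y0 x == 1) <;> simp [h]
        · simp [hy, PySem.Dict.get?_insert_of_ne _ _ hy]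
      · rw [show pvStep squares y (t, b, l, r) x = (t, b, l, r) from by simp [pvStep, h]]
        rw [ih]
        by_cases hy : y0 = y
        · subst hy
          simp only [if_pos rfl, List.reverse_cons, List.find?_append, List.find?_cons]
          rw [show (pvCell squares y0 x == 1) = false from by simp [h]]
          cases hf : rest.reverse.find? (fun x => pvCell squares y0 x == 1) <;> simp
        · simp [hy]

theorem pv_top_outer (squares : List (List Int)) (xs0 ys : List Int)
    (st : PySem.Dict Int Int × PySem.Dict Int Int × PySem.Dict Int Int × PySem.Dict Int Int)
    (x0 : Int) :
    ((ys.foldl (fun st y => xs0.foldl (fun st x => pvStep squares y st x) st) st).1).get? x0 =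
      (st.1.get? x0).or
        (if x0 ∈ xs0 then ys.find? (fun y => pvCell squares y x0 == 1) else none) := by
  induction ys generalizing st with
  | nil => simp
  | cons y rest ih =>
      rw [List.foldl_cons, ih]
      have h1 := pv_top_inner squares y xs0 st.1 st.2.1 st.2.2.1 st.2.2.2 x0
      rw [show (st.1, st.2.1, st.2.2.1, st.2.2.2) = st from rfl] at h1
      rw [h1, Option.or_assoc]
      congr 1
      by_cases hm : x0 ∈ xs0
      · by_cases hc : pvCell squares y x0 = 1
        · simp [hm, hc, List.find?_cons]
        · have hb : (pvCell squares y x0 == 1) = false := by simp [hc]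
          simp [hm, hc, List.find?_cons, hb]
      · simp [hm]

theorem pv_bot_outer (squares : List (List Int)) (xs0 ys : List Int)
    (st : PySem.Dict Int Int × PySem.Dict Int Int × PySem.Dict Int Int × PySem.Dict Int Int)
    (x0 : Int) :
    ((ys.foldl (fun st y => xs0.foldl (fun st x => pvStep squares y st x) st) st).2.1).get? x0 =
      (if x0 ∈ xs0 then ys.reverse.find? (fun y => pvCell squares y x0 == 1) else none).or
        (st.2.1.get? x0) := by
  induction ys generalizing st with
  | nil => simp
  | cons y rest ih =>
      rw [List.foldl_cons, ih]
      have h1 := pv_bot_inner squares y xs0 st.1 st.2.1 st.2.2.1 st.2.2.2 x0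
      rw [show (st.1, st.2.1, st.2.2.1, st.2.2.2) = st from rfl] at h1
      rw [h1]
      by_cases hm : x0 ∈ xs0
      · simp only [hm, true_and, if_true, List.reverse_cons, List.find?_append]
        by_cases hc : pvCell squares y x0 = 1
        · have hb : (pvCell squares y x0 == 1) = true := by simp [hc]
          cases hf : rest.reverse.find? (fun y => pvCell squares y x0 == 1) <;>
            simp [hf, hm, hc, hb, List.find?_cons, Option.or_assoc]
        · have hb : (pvCell squares y x0 == 1) = false := by simp [hc]
          cases hf : rest.reverse.find? (fun y => pvCell squares y x0 == 1) <;>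
            simp [hf, hm, hc, hb, List.find?_cons, Option.or_assoc]
      · simp [hm]

theorem pv_left_outer (squares : List (List Int)) (xs0 ys : List Int)
    (st : PySem.Dict Int Int × PySem.Dict Int Int × PySem.Dict Int Int × PySem.Dict Int Int)
    (y0 : Int) :
    ((ys.foldl (fun st y => xs0.foldl (fun st x => pvStep squares y st x) st) st).2.2.1).get? y0 =
      (st.2.2.1.get? y0).or
        (if y0 ∈ ys then xs0.find? (fun x => pvCell squares y0 x == 1) else none) := by
  induction ys generalizing st with
  | nil => simp
  | cons y rest ih =>
      rw [List.foldl_cons, ih]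
      have h1 := pv_left_inner squares y xs0 st.1 st.2.1 st.2.2.1 st.2.2.2 y0
      rw [show (st.1, st.2.1, st.2.2.1, st.2.2.2) = st from rfl] at h1
      rw [h1, Option.or_assoc]
      congr 1
      by_cases hy : y0 = y
      · subst hy
        cases hf : xs0.find? (fun x => pvCell squares y0 x == 1) <;>
          by_cases hm : y0 ∈ rest <;> simp [hf, hm]
      · simp [hy, List.mem_cons]

theorem pv_right_outer (squares : List (List Int)) (xs0 ys : List Int)
    (st : PySem.Dict Int Int × PySem.Dict Int Int × PySem.Dict Int Int × PySem.Dict Int Int)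
    (y0 : Int) :
    ((ys.foldl (fun st y => xs0.foldl (fun st x => pvStep squares y st x) st) st).2.2.2).get? y0 =
      (if y0 ∈ ys then xs0.reverse.find? (fun x => pvCell squares y0 x == 1) else none).or
        (st.2.2.2.get? y0) := by
  induction ys generalizing st with
  | nil => simp
  | cons y rest ih =>
      rw [List.foldl_cons, ih]
      have h1 := pv_right_inner squares y xs0 st.1 st.2.1 st.2.2.1 st.2.2.2 y0
      rw [show (st.1, st.2.1, st.2.2.1, st.2.2.2) = st from rfl] at h1
      rw [h1]
      by_cases hy : y0 = y
      · subst hy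
        cases hg : xs0.reverse.find? (fun x => pvCell squares y0 x == 1) <;>
          by_cases hm : y0 ∈ rest <;> simp [hg, hm, Option.or_assoc]
      · simp [hy, List.mem_cons]

theorem foldl_append_toList {α : Type} (l : List α) (f : α → Option (List Int))
    (init : List (List Int)) :
    l.foldl (fun bs a => bs ++ (f a).toList) init = init ++ l.filterMap f := by
  induction l generalizing init with
  | nil => simp
  | cons a rest ih =>
      cases h : f a <;> simp [List.filterMap_cons, h, ih]




theorem pv_main (squares : List (List Int)) :
    getBorderSquares squares = getBorderSquares_alt squares := by
  unfold getBorderSquares getBorderSquares_alt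
  dsimp only
  set W : Int := ((PySem.List.pyGetD squares 0 []).length : Int) with hW
  set H : Int := (squares.length : Int) with hH
  set xs0 := PySem.List.pyRange 0 W 1 with hxs0
  set ys0 := PySem.List.pyRange 0 H 1 with hys0
  have hrev : PySem.List.pyRange (W - 1) (-1) (-1) = xs0.reverse := by
    have := PySem.List.pyRange_neg_one_eq_reverse (a := W - 1) (b := -1); simpa using this
  have hrevH : PySem.List.pyRange (H - 1) (-1) (-1) = ys0.reverse := by
    have := PySem.List.pyRange_neg_one_eq_reverse (a := H - 1) (b := -1); simpa using this
  have hcol : ∀ (ys : List Int) (init : List (List Int)) (xs : List Int),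
      xs.foldl (fun bs x => pvScanCol squares x bs ys) init
        = init ++ xs.filterMap
            (fun x => (ys.find? (fun y => pvCell squares y x == 1)).map (fun y => [x, y])) := by
    intro ys init xs
    have he : (fun (bs : List (List Int)) x => pvScanCol squares x bs ys)
        = (fun bs x => bs ++ ((ys.find? (fun y => pvCell squares y x == 1)).map
            (fun y => [x, y])).toList) := by
      funext bs x; exact pvScanCol_eq squares x bs ys
    rw [he, foldl_append_toList]
  have hrow : ∀ (xs : List Int) (init : List (List Int)) (ys : List Int),
      ys.foldl (fun bs y => pvScanRow squares y bs xs) init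
        = init ++ ys.filterMap
            (fun y => (xs.find? (fun x => pvCell squares y x == 1)).map (fun x => [x, y])) := by
    intro xs init ys
    have he : (fun (bs : List (List Int)) y => pvScanRow squares y bs xs)
        = (fun bs y => bs ++ ((xs.find? (fun x => pvCell squares y x == 1)).map
            (fun x => [x, y])).toList) := by
      funext bs y; exact pvScanRow_eq squares y bs xs
    rw [he, foldl_append_toList]
  rw [hrev, hrevH, hcol, hrow, hcol, hrow]
  simp only [List.nil_append, List.append_assoc]
  congr 1
  · -- top group
    apply List.filterMap_congr
    intro x hx
    rw [pv_top_outer]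
    simp [hx, PySem.Dict.get?_empty]
  congr 1
  · -- right group
    apply List.filterMap_congr
    intro y hy
    rw [pv_right_outer]
    simp [hy, PySem.Dict.get?_empty]
  congr 1
  · -- bottom group
    apply List.filterMap_congr
    intro x hx
    rw [pv_bot_outer]
    simp [hx, PySem.Dict.get?_empty]
  · -- left group
    apply List.filterMap_congr
    intro y hy
    rw [pv_left_outer]
    simp [hy, PySem.Dict.get?_empty]

-- ===== VERDICT (by name: the statement is the Claim_ definition above) =====
theorem getBorderSquares_spec : Claim_equal_getBorderSquares := by
  intro squares _ _
  unfold Spec_getBorderSquares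
  exact pv_main squares
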